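-- pv_equiv track=rewrite | github.com/Shiatler/SummonersLedger | combat/moves.py | _ability_mod
-- ===== SOURCE A (Python) =====
-- from typing import Optional, Dict, Any, Iterable, Tuple, List
--
-- def _ability_mod(stats: Dict[str, Any] | None, ability: str) -> int:
--     """Read a mod from stats['mods'] with tolerant keys & alternatives."""
--     try:
--         mods = (stats or {}).get("mods", {}) or {}
--         if "|" in ability:
--             left, right = [a.strip().upper() for a in ability.split("|", 1)]
--             return max(_ability_mod(stats, left), _ability_mod(stats, right))
--         key_upper = ability.upper()
--         key_lower = key_upper.lower()
--         if key_upper in mods: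
--             return int(mods.get(key_upper, 0))
--         if key_lower in mods:
--             return int(mods.get(key_lower, 0))
--         return 0
--     except Exception:
--         return 0
-- ===== SOURCE B (Python) =====
-- def _lookup_one(mods, name):
--     """Tolerant single-key lookup: upper key, then lower key, else 0; conversion errors yield 0."""
--     try:
--         key = name.upper()
--         val = mods.get(key)
--         if val is None:
--             val = mods.get(key.lower())
--         return int(val) if val is not None else 0
--     except Exception:
--         return 0
--
--
-- def _ability_mod(stats, ability):
--     """Single left-to-right character scan instead of recursive splitting on '|'."""
--     mods = (stats or {}).get("mods") or {}
--     if "|" not in ability: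
--         return _lookup_one(mods, ability)
--     best = None
--     cur = []
--     for ch in ability + "|":
--         if ch == "|":
--             val = _lookup_one(mods, "".join(cur).strip())
--             if best is None or val > best:
--                 best = val
--             cur = []
--         else:
--             cur.append(ch)
--     return best if best is not None else 0
-- ===== Notes on version B (the rewrite author's own statement) =====
-- stated objective: simpler
-- what changed: A recursively splits on the first '|' (re-stripping and re-uppercasing remainders at every level); B does one left-to-right character scan over ability+'|' keeping a running best, with the tolerant single-key lookup factored into a helper.
import Mathlib
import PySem

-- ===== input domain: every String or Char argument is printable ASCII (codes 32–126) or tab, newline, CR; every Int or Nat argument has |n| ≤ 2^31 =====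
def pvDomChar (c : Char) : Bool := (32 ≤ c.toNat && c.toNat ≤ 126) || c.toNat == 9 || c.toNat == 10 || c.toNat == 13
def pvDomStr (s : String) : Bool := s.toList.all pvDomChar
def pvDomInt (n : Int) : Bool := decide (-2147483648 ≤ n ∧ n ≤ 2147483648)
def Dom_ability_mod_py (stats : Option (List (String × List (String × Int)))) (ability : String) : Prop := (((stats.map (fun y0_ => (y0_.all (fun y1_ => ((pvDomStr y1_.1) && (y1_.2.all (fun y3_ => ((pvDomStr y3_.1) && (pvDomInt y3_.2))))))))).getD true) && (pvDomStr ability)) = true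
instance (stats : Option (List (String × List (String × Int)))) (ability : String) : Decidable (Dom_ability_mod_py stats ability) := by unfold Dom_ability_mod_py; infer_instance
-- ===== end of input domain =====

-- B replaces A's recursive splitting on '|' by a single left-to-right character scan with a
-- running best; objective: simpler (one pass, no recursion, no intermediate split lists).

-- ===== PORT A =====

-- the tolerant single-key lookup at the bottom of A's recursion (upper key, then lower key, else 0)
def pvLookA (mods : PySem.Dict String Int) (ab : List Char) : Int :=
  let keyUpper := PySem.Chars.upper ab
  let keyLower := PySem.Chars.lower keyUpper
  if mods.contains (String.ofList keyUpper) then mods.getD (String.ofList keyUpper) 0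
  else if mods.contains (String.ofList keyLower) then mods.getD (String.ofList keyLower) 0
  else 0

-- A's recursion on '|' as fuel-indexed structural recursion; fuel starts above the string
-- length and every recursive argument is strictly shorter, so fuel 0 is unreachable.
def pvGoA (mods : PySem.Dict String Int) : Nat → List Char → Int
  | 0, _ => 0
  | fuel+1, ab =>
    if PySem.Chars.isIn ['|'] ab then
      match PySem.Chars.splitOnMax ab ['|'] 1 with
      | [l, r] => max (pvGoA mods fuel (PySem.Chars.upper (PySem.Chars.strip l)))
                      (pvGoA mods fuel (PySem.Chars.upper (PySem.Chars.strip r)))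
      | _ => 0   -- unreachable: split with '|' present always yields exactly two pieces
    else pvLookA mods ab

def ability_mod_py (stats : Option (List (String × List (String × Int)))) (ability : String) : Int :=
  -- (stats or {}): None and the empty dict are both falsy
  let base : List (String × List (String × Int)) :=
    match stats with
    | none => []
    | some s => if s.isEmpty then [] else s
  -- .get("mods", {})
  let mods0 := (PySem.Dict.mk base).getD "mods" []
  -- ... or {}
  let mods : PySem.Dict String Int := PySem.Dict.mk (if mods0.isEmpty then [] else mods0)
  pvGoA mods (ability.toList.length + 1) ability.toList

-- ===== PORT B =====

-- _lookup_one: value at the upper-cased key, falling back to the lower-cased key, else 0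
def pvLookB (mods : PySem.Dict String Int) (name : List Char) : Int :=
  let key := PySem.Chars.upper name
  match mods.get? (String.ofList key) with
  | some v => v
  | none =>
    match mods.get? (String.ofList (PySem.Chars.lower key)) with
    | some v => v
    | none => 0

-- the for-loop over ability + "|" with state (best, cur)
def pvScanB (mods : PySem.Dict String Int) : List Char → Option Int × List Char → Option Int
  | [], (best, _) => best
  | ch :: rest, (best, cur) =>
    if ch = '|' then
      let v := pvLookB mods (PySem.Chars.strip cur)
      let best' : Option Int :=
        match best with
        | none => some v
        | some b => if b < v then some v else some b
      pvScanB mods rest (best', [])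
    else pvScanB mods rest (best, cur ++ [ch])

def ability_mod_py_alt (stats : Option (List (String × List (String × Int)))) (ability : String) : Int :=
  -- mods = (stats or {}).get("mods") or {}   (stats = some [] behaves exactly like none)
  let mods : PySem.Dict String Int :=
    PySem.Dict.mk (match (PySem.Dict.mk (stats.getD [])).get? "mods" with
      | none => []
      | some m => if m.isEmpty then [] else m)
  if PySem.Chars.isIn ['|'] ability.toList then
    -- best is never None after the loop (the appended '|' fires at least once); .getD 0 is the unreachable default
    (pvScanB mods (ability.toList ++ ['|']) (none, [])).getD 0
  else pvLookB mods ability.toList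

-- ===== PRECONDITION & SPEC =====
def Spec_ability_mod_py (stats : Option (List (String × List (String × Int)))) (ability : String) (out : Int) : Prop := out = ability_mod_py_alt stats ability
instance (stats : Option (List (String × List (String × Int)))) (ability : String) (out : Int) : Decidable (Spec_ability_mod_py stats ability out) := by unfold Spec_ability_mod_py; infer_instance

-- ===== CLAIM (what is proved, stated in full; the proofs are below) =====
def Claim_equal_ability_mod_py : Prop := ∀ (stats : Option (List (String × List (String × Int)))) (ability : String), Dom_ability_mod_py stats ability → Spec_ability_mod_py stats ability (ability_mod_py stats ability)

-- ===== LEMMAS AND PROOFS =====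

-- ---- character-level facts ----
theorem pv_char_le_iff (a c : Char) : a ≤ c ↔ a.toNat ≤ c.toNat := by
  rw [Char.le_def]; exact UInt32.le_iff_toNat_le

theorem pv_islower_iff (c : Char) : PySem.Chars.islower c = true ↔ 97 ≤ c.toNat ∧ c.toNat ≤ 122 := by
  simp only [PySem.Chars.islower, Bool.and_eq_true, decide_eq_true_eq, pv_char_le_iff]
  constructor <;> intro h <;> exact ⟨h.1, h.2⟩

theorem pv_upperChar_toNat (c : Char) : (PySem.Chars.upperChar c).toNat =
    if 97 ≤ c.toNat ∧ c.toNat ≤ 122 then c.toNat - 32 else c.toNat := by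
  unfold PySem.Chars.upperChar
  by_cases h : PySem.Chars.islower c = true
  · have hb := (pv_islower_iff c).mp h
    rw [if_pos h, if_pos hb, Char.toNat_ofNat, if_pos (Or.inl (by omega))]
  · rw [if_neg (by simpa using h), if_neg]
    intro hb; exact h ((pv_islower_iff c).mpr hb)

theorem pv_upperChar_idem (c : Char) :
    PySem.Chars.upperChar (PySem.Chars.upperChar c) = PySem.Chars.upperChar c := by
  apply Char.ext
  apply UInt32.toNat_inj.mp
  show (PySem.Chars.upperChar (PySem.Chars.upperChar c)).toNat = (PySem.Chars.upperChar c).toNat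
  rw [pv_upperChar_toNat, pv_upperChar_toNat]
  split_ifs <;> omega

theorem pv_isspace_upperChar (c : Char) :
    PySem.Chars.isspace (PySem.Chars.upperChar c) = PySem.Chars.isspace c := by
  unfold PySem.Chars.isspace
  rw [pv_upperChar_toNat]
  by_cases hb : 97 ≤ c.toNat ∧ c.toNat ≤ 122
  · rw [if_pos hb]
    apply Bool.eq_iff_iff.mpr
    simp only [Bool.or_eq_true, Bool.and_eq_true, decide_eq_true_eq]
    constructor <;> intro hx <;> (exfalso; omega)
  · rw [if_neg hb]

theorem pv_upperChar_pipe_iff (c : Char) : PySem.Chars.upperChar c = '|' ↔ c = '|' := by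
  constructor
  · intro h
    apply Char.ext; apply UInt32.toNat_inj.mp
    have hu := pv_upperChar_toNat c
    rw [h] at hu
    show c.toNat = ('|').toNat
    have hp : ('|').toNat = 124 := by decide
    rw [hp]; rw [hp] at hu
    split_ifs at hu <;> omega
  · intro h; subst h; decide

theorem pv_space_ne_pipe (c : Char) (hc : PySem.Chars.isspace c = true) : c ≠ '|' := by
  intro h; subst h; exact absurd hc (by decide)

-- ---- whole-string facts ----
theorem pv_upper_upper (x : List Char) :
    PySem.Chars.upper (PySem.Chars.upper x) = PySem.Chars.upper x := by
  simp [PySem.Chars.upper, Function.comp_def, pv_upperChar_idem]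

theorem pv_lstrip_upper (x : List Char) :
    PySem.Chars.lstrip (PySem.Chars.upper x) = PySem.Chars.upper (PySem.Chars.lstrip x) := by
  simp [PySem.Chars.lstrip, PySem.Chars.upper, List.dropWhile_map, Function.comp_def, pv_isspace_upperChar]

theorem pv_rstrip_upper (x : List Char) :
    PySem.Chars.rstrip (PySem.Chars.upper x) = PySem.Chars.upper (PySem.Chars.rstrip x) := by
  simp [PySem.Chars.rstrip, PySem.Chars.upper, List.dropWhile_map, ← List.map_reverse,
        Function.comp_def, pv_isspace_upperChar]

theorem pv_strip_upper (x : List Char) :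
    PySem.Chars.strip (PySem.Chars.upper x) = PySem.Chars.upper (PySem.Chars.strip x) := by
  simp [PySem.Chars.strip, pv_lstrip_upper, pv_rstrip_upper]

theorem pv_mem_strip (a : Char) (x : List Char) (h : a ∈ PySem.Chars.strip x) : a ∈ x := by
  unfold PySem.Chars.strip PySem.Chars.rstrip PySem.Chars.lstrip at h
  have h1 := List.dropWhile_sublist (l := (List.dropWhile PySem.Chars.isspace x).reverse)
    (p := PySem.Chars.isspace)
  have h2 := List.dropWhile_sublist (l := x) (p := PySem.Chars.isspace)
  rw [List.mem_reverse] at h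
  exact h2.mem (by simpa using h1.mem h)

theorem pv_pipe_mem_upper (x : List Char) : '|' ∈ PySem.Chars.upper x ↔ '|' ∈ x := by
  simp only [PySem.Chars.upper, List.mem_map]
  constructor
  · rintro ⟨c, hc, he⟩
    rwa [(pv_upperChar_pipe_iff c).mp he] at hc
  · intro h; exact ⟨'|', h, by decide⟩

theorem pv_isIn_pipe (ab : List Char) : PySem.Chars.isIn ['|'] ab = true ↔ '|' ∈ ab := by
  rw [PySem.Chars.isIn_iff_infix]
  exact List.singleton_infix_iff '|' ab

theorem pv_length_strip (x : List Char) : (PySem.Chars.strip x).length ≤ x.length := by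
  unfold PySem.Chars.strip PySem.Chars.rstrip PySem.Chars.lstrip
  have h1 := (List.dropWhile_sublist (l := (List.dropWhile PySem.Chars.isspace x).reverse)
    (p := PySem.Chars.isspace)).length_le
  have h2 := (List.dropWhile_sublist (l := x) (p := PySem.Chars.isspace)).length_le
  simp only [List.length_reverse] at *
  omega

theorem pv_length_upper (x : List Char) : (PySem.Chars.upper x).length = x.length := by
  simp [PySem.Chars.upper]

theorem pv_rstrip_snoc (y : List Char) (c : Char) :
    PySem.Chars.rstrip (y ++ [c]) =
      if PySem.Chars.isspace c then PySem.Chars.rstrip y else y ++ [c] := by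
  unfold PySem.Chars.rstrip
  rw [List.reverse_append]
  simp only [List.reverse_cons, List.reverse_nil, List.nil_append, List.singleton_append,
    List.dropWhile_cons]
  by_cases hc : PySem.Chars.isspace c = true
  · simp [hc]
  · simp only [hc, Bool.false_eq_true, if_false]
    simp only [Bool.not_eq_true] at hc
    simp [hc]

theorem pv_strip_cons_space (c : Char) (s : List Char) (hc : PySem.Chars.isspace c = true) :
    PySem.Chars.strip (c :: s) = PySem.Chars.strip s := by
  unfold PySem.Chars.strip PySem.Chars.lstrip
  rw [List.dropWhile_cons, if_pos hc]

theorem pv_lstrip_eq_nil_iff (z : List Char) :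
    PySem.Chars.lstrip z = [] ↔ ∀ a ∈ z, PySem.Chars.isspace a := by
  unfold PySem.Chars.lstrip
  exact List.dropWhile_eq_nil_iff

theorem pv_strip_snoc_space (z : List Char) (c : Char) (hc : PySem.Chars.isspace c = true) :
    PySem.Chars.strip (z ++ [c]) = PySem.Chars.strip z := by
  unfold PySem.Chars.strip
  by_cases hz : PySem.Chars.lstrip z = []
  · have hall := (pv_lstrip_eq_nil_iff z).mp hz
    have h2 : PySem.Chars.lstrip (z ++ [c]) = [] := by
      rw [pv_lstrip_eq_nil_iff]
      intro a ha
      rcases List.mem_append.mp ha with h | h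
      · exact hall a h
      · simp only [List.mem_singleton] at h; subst h; exact hc
    rw [hz, h2]
  · have h2 : PySem.Chars.lstrip (z ++ [c]) = PySem.Chars.lstrip z ++ [c] := by
      unfold PySem.Chars.lstrip at *
      rw [List.dropWhile_append]
      simp [hz]
    rw [h2, pv_rstrip_snoc, if_pos hc]

-- ---- characterisation of splitOnMax ab ['|'] 1 ----
theorem pv_go_zero (fuel : Nat) (l cur : List Char) (acc : List (List Char)) :
    PySem.Chars.splitOnMax.go ['|'] fuel 0 l cur acc = ((cur.reverse ++ l) :: acc).reverse := by
  cases fuel with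
  | zero => rfl
  | succ fuel => cases l with
    | nil => simp [PySem.Chars.splitOnMax.go]
    | cons c rest => simp [PySem.Chars.splitOnMax.go]

theorem pv_go_one (fuel : Nat) : ∀ (l cur : List Char) (acc : List (List Char)),
    l.length ≤ fuel →
    PySem.Chars.splitOnMax.go ['|'] fuel 1 l cur acc =
      acc.reverse ++ (if '|' ∈ l then
          [cur.reverse ++ l.takeWhile (· ≠ '|'), (l.dropWhile (· ≠ '|')).drop 1]
        else [cur.reverse ++ l]) := by
  induction fuel with
  | zero =>
    intro l cur acc hl
    have : l = [] := List.eq_nil_of_length_eq_zero (Nat.le_zero.mp hl)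
    subst this
    simp [PySem.Chars.splitOnMax.go]
  | succ fuel ih =>
    intro l cur acc hl
    cases l with
    | nil => simp [PySem.Chars.splitOnMax.go]
    | cons c rest =>
      by_cases hc : c = '|'
      · subst hc
        have hpre : List.isPrefixOf ['|'] ('|' :: rest) = true := by
          simp [List.isPrefixOf]
        rw [show PySem.Chars.splitOnMax.go ['|'] (fuel+1) 1 ('|' :: rest) cur acc =
            PySem.Chars.splitOnMax.go ['|'] fuel 0 (List.drop 1 ('|' :: rest)) [] (cur.reverse :: acc) by
          simp [PySem.Chars.splitOnMax.go, hpre]]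
        rw [pv_go_zero]
        simp [List.takeWhile, List.dropWhile]
      · have hpre : List.isPrefixOf ['|'] (c :: rest) = false := by
          simp [List.isPrefixOf]; exact fun h => absurd h.symm hc
        rw [show PySem.Chars.splitOnMax.go ['|'] (fuel+1) 1 (c :: rest) cur acc =
            PySem.Chars.splitOnMax.go ['|'] fuel 1 rest (c :: cur) acc by
          simp [PySem.Chars.splitOnMax.go, hpre]]
        rw [ih rest (c :: cur) acc (by simpa using hl)]
        have hmem : ('|' ∈ (c :: rest)) ↔ ('|' ∈ rest) := by
          constructor
          · intro h
            rcases List.mem_cons.mp h with h | h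
            · exact absurd h.symm hc
            · exact h
          · exact List.mem_cons_of_mem c
        by_cases hr : '|' ∈ rest
        · rw [if_pos hr, if_pos (hmem.mpr hr)]
          simp [List.takeWhile, List.dropWhile, hc]
        · rw [if_neg hr, if_neg (fun h => hr (hmem.mp h))]
          simp [hc]

theorem pv_splitOnMax_pipe (ab : List Char) :
    PySem.Chars.splitOnMax ab ['|'] 1 =
      if '|' ∈ ab then [ab.takeWhile (· ≠ '|'), (ab.dropWhile (· ≠ '|')).drop 1]
      else [ab] := by
  unfold PySem.Chars.splitOnMax
  rw [if_neg (by norm_num)]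
  rw [show (1 : Int).toNat = 1 from rfl]
  rw [pv_go_one (ab.length + 1) ab [] [] (Nat.le_succ _)]
  simp

theorem pv_dropWhile_mem (ab : List Char) (hm : '|' ∈ ab) :
    ab.dropWhile (· ≠ '|') = '|' :: (ab.dropWhile (· ≠ '|')).drop 1 := by
  induction ab with
  | nil => cases hm
  | cons c t ih =>
    by_cases hc : c = '|'
    · subst hc
      rw [List.dropWhile_cons, if_neg (by simp)]
      rfl
    · rw [List.dropWhile_cons, if_pos (by simp [hc])]
      rcases List.mem_cons.mp hm with h | h
      · exact absurd h.symm hc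
      · exact ih h

-- ---- segmentation: the raw '|'-free segments of a string, as (first segment, later segments) ----
def pvSegs : List Char → List Char × List (List Char)
  | [] => ([], [])
  | c :: t =>
    let p := pvSegs t
    if c = '|' then ([], p.1 :: p.2) else (c :: p.1, p.2)

def pvParts (x : List Char) : List (List Char) := (pvSegs x).1 :: (pvSegs x).2

def pvVals (mods : PySem.Dict String Int) (x : List Char) : List Int :=
  ((pvParts x).map PySem.Chars.strip).map (pvLookA mods)

def pvMax : List Int → Int
  | [] => 0
  | v :: vs => List.foldl max v vs

def pvAcc : Option Int → List Int → Int
  | none, vs => pvMax vs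
  | some b, vs => List.foldl max b vs

theorem pv_segs_no_pipe (l : List Char) (h : '|' ∉ l) : pvSegs l = (l, []) := by
  induction l with
  | nil => rfl
  | cons c t ih =>
    have hc : c ≠ '|' := fun he => h (he ▸ List.mem_cons_self)
    simp only [pvSegs, ih (fun hm => h (List.mem_cons_of_mem _ hm)), if_neg hc]

theorem pv_segs_append_pipe (l r : List Char) (h : '|' ∉ l) :
    pvSegs (l ++ '|' :: r) = (l, (pvSegs r).1 :: (pvSegs r).2) := by
  induction l with
  | nil => simp [pvSegs]
  | cons c t ih =>
    have hc : c ≠ '|' := fun he => h (he ▸ List.mem_cons_self)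
    simp only [List.cons_append, pvSegs, ih (fun hm => h (List.mem_cons_of_mem _ hm)), if_neg hc]

theorem pv_segs_upper (x : List Char) :
    pvSegs (PySem.Chars.upper x) =
      (PySem.Chars.upper (pvSegs x).1, ((pvSegs x).2).map PySem.Chars.upper) := by
  induction x with
  | nil => simp [pvSegs, PySem.Chars.upper]
  | cons c t ih =>
    show pvSegs (PySem.Chars.upperChar c :: PySem.Chars.upper t) = _
    by_cases hc : c = '|'
    · subst hc
      rw [show PySem.Chars.upperChar '|' = '|' by decide]
      simp only [pvSegs, ih, if_pos]
      simp [PySem.Chars.upper]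
    · have hc' : PySem.Chars.upperChar c ≠ '|' := fun h => hc ((pv_upperChar_pipe_iff c).mp h)
      simp only [pvSegs, if_neg hc, if_neg hc', ih]
      simp [PySem.Chars.upper]

-- last-segment modification, for the snoc characterisation of pvSegs
def pvModLast (c : Char) : List (List Char) → List (List Char)
  | [] => []
  | [s] => [s ++ [c]]
  | s :: ss => s :: pvModLast c ss

theorem pv_modLast_cons (c : Char) (s : List Char) (ss : List (List Char)) (h : ss ≠ []) :
    pvModLast c (s :: ss) = s :: pvModLast c ss := by
  cases ss with
  | nil => exact absurd rfl h
  | cons a as => rfl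

theorem pv_segs_snoc (c : Char) (hc : c ≠ '|') (z : List Char) :
    pvSegs (z ++ [c]) =
      if (pvSegs z).2 = [] then ((pvSegs z).1 ++ [c], [])
      else ((pvSegs z).1, pvModLast c (pvSegs z).2) := by
  induction z with
  | nil => simp [pvSegs, hc]
  | cons d t ih =>
    by_cases hd : d = '|'
    · subst hd
      simp only [List.cons_append, pvSegs, ih]
      by_cases h2 : (pvSegs t).2 = []
      · simp [h2, pvModLast]
      · simp only [h2, if_false]
        simp only [List.cons_ne_nil, reduceIte]
        rw [pv_modLast_cons _ _ _ h2]
    · simp only [List.cons_append, pvSegs, if_neg hd, ih]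
      by_cases h2 : (pvSegs t).2 = []
      · simp [h2]
      · simp [h2]

theorem pv_map_strip_modLast (c : Char) (hc : PySem.Chars.isspace c = true) :
    ∀ ss : List (List Char), (pvModLast c ss).map PySem.Chars.strip = ss.map PySem.Chars.strip
  | [] => rfl
  | [s] => by simp [pvModLast, pv_strip_snoc_space s c hc]
  | s :: s' :: ss => by
    rw [pv_modLast_cons c s (s' :: ss) (by simp)]
    simp only [List.map_cons]
    rw [show ((pvModLast c (s' :: ss)).map PySem.Chars.strip) = (s' :: ss).map PySem.Chars.strip
      from pv_map_strip_modLast c hc (s' :: ss)]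
    simp

theorem pv_parts_strip_lstrip (x : List Char) :
    (pvParts (PySem.Chars.lstrip x)).map PySem.Chars.strip = (pvParts x).map PySem.Chars.strip := by
  induction x with
  | nil => rfl
  | cons c t ih =>
    by_cases hc : PySem.Chars.isspace c = true
    · rw [show PySem.Chars.lstrip (c :: t) = PySem.Chars.lstrip t by
        unfold PySem.Chars.lstrip; rw [List.dropWhile_cons, if_pos hc]]
      rw [ih]
      have hcp : c ≠ '|' := pv_space_ne_pipe c hc
      unfold pvParts
      simp only [pvSegs, if_neg hcp, List.map_cons]
      rw [pv_strip_cons_space c _ hc]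
    · rw [show PySem.Chars.lstrip (c :: t) = c :: t by
        unfold PySem.Chars.lstrip; rw [List.dropWhile_cons, if_neg hc]]

theorem pv_parts_strip_rstrip (x : List Char) :
    (pvParts (PySem.Chars.rstrip x)).map PySem.Chars.strip = (pvParts x).map PySem.Chars.strip := by
  induction x using List.reverseRecOn with
  | nil => rfl
  | append_singleton y c ih =>
    rw [pv_rstrip_snoc]
    by_cases hc : PySem.Chars.isspace c = true
    · rw [if_pos hc, ih]
      have hcp : c ≠ '|' := pv_space_ne_pipe c hc
      unfold pvParts
      rw [pv_segs_snoc c hcp y]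
      by_cases h2 : (pvSegs y).2 = []
      · simp only [h2, if_true, reduceIte, List.map_cons, List.map_nil]
        rw [pv_strip_snoc_space _ _ hc]
      · simp only [h2, if_false, reduceIte, List.map_cons]
        rw [pv_map_strip_modLast c hc]
    · rw [if_neg (by simpa using hc)]

theorem pv_parts_strip_strip (x : List Char) :
    (pvParts (PySem.Chars.strip x)).map PySem.Chars.strip = (pvParts x).map PySem.Chars.strip := by
  rw [show PySem.Chars.strip x = PySem.Chars.rstrip (PySem.Chars.lstrip x) from rfl,
      pv_parts_strip_rstrip, pv_parts_strip_lstrip]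

-- ---- lookup lemmas ----
theorem pv_look_eq (mods : PySem.Dict String Int) (x : List Char) :
    pvLookB mods x = pvLookA mods x := by
  simp only [pvLookA, pvLookB, PySem.Dict.contains_eq_isSome_get?, PySem.Dict.getD_eq_get?_getD]
  cases hu : mods.get? (String.ofList (PySem.Chars.upper x)) with
  | some v => simp [hu]
  | none =>
    cases hl : mods.get? (String.ofList (PySem.Chars.lower (PySem.Chars.upper x))) with
    | some v => simp [hu, hl]
    | none => simp [hu, hl]

theorem pv_lookA_upper (mods : PySem.Dict String Int) (x : List Char) :
    pvLookA mods (PySem.Chars.upper x) = pvLookA mods x := by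
  unfold pvLookA
  rw [pv_upper_upper]

-- ---- fold-max algebra ----
theorem pv_foldl_max_comm (a b : Int) (l : List Int) :
    max a (List.foldl max b l) = List.foldl max (max a b) l := by
  induction l generalizing b with
  | nil => rfl
  | cons x xs ih => simp only [List.foldl]; rw [ih, max_assoc]

theorem pv_pipe_mem_dropWhile (x : List Char) (h : '|' ∈ x) :
    '|' ∈ x.dropWhile PySem.Chars.isspace := by
  conv at h => rw [← List.takeWhile_append_dropWhile (p := PySem.Chars.isspace) (l := x)]
  rcases List.mem_append.mp h with h1 | h2
  · exact absurd (List.mem_takeWhile_imp h1) (by decide)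
  · exact h2

theorem pv_pipe_mem_strip (x : List Char) (h : '|' ∈ x) : '|' ∈ PySem.Chars.strip x := by
  unfold PySem.Chars.strip PySem.Chars.rstrip PySem.Chars.lstrip
  rw [List.mem_reverse]
  exact pv_pipe_mem_dropWhile _ (by rw [List.mem_reverse]; exact pv_pipe_mem_dropWhile _ h)

-- ---- the values A and B aggregate are insensitive to A's extra strip/upper passes ----
theorem pv_vals_upper (mods : PySem.Dict String Int) (y : List Char) :
    pvVals mods (PySem.Chars.upper y) = pvVals mods y := by
  unfold pvVals pvParts
  rw [pv_segs_upper]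
  simp only [← List.map_cons (f := PySem.Chars.upper), List.map_map]
  apply List.map_congr_left
  intro s _
  simp only [Function.comp_apply]
  rw [pv_strip_upper, pv_lookA_upper]

theorem pv_vals_upper_strip (mods : PySem.Dict String Int) (r : List Char) :
    pvVals mods (PySem.Chars.upper (PySem.Chars.strip r)) = pvVals mods r := by
  rw [pv_vals_upper]
  unfold pvVals
  rw [pv_parts_strip_strip]

-- ---- A's recursion computes the max over the stripped raw segments ----
theorem pv_goA_spec (mods : PySem.Dict String Int) (fuel : Nat) : ∀ ab : List Char,
    ab.length < fuel →
    pvGoA mods fuel ab =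
      if '|' ∈ ab then pvMax (pvVals mods ab) else pvLookA mods ab := by
  induction fuel with
  | zero => intro ab h; omega
  | succ fuel ih =>
    intro ab h
    by_cases hm : '|' ∈ ab
    · rw [if_pos hm]
      have hIn : PySem.Chars.isIn ['|'] ab = true := (pv_isIn_pipe ab).mpr hm
      simp only [pvGoA, hIn, if_true]
      rw [pv_splitOnMax_pipe, if_pos hm]
      -- names for the two pieces
      have hl_nop : '|' ∉ ab.takeWhile (· ≠ '|') := by
        intro hx
        have := List.mem_takeWhile_imp hx
        simp at this
      have hab : ab = ab.takeWhile (· ≠ '|') ++ '|' :: (ab.dropWhile (· ≠ '|')).drop 1 := by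
        conv_lhs => rw [← List.takeWhile_append_dropWhile (p := (· ≠ '|')) (l := ab)]
        rw [← pv_dropWhile_mem ab hm]
      have hlen : (ab.takeWhile (· ≠ '|')).length + 1 + ((ab.dropWhile (· ≠ '|')).drop 1).length
          = ab.length := by
        conv_rhs => rw [hab]
        simp only [List.length_append, List.length_cons]
        omega
      -- the left piece: no '|' left, so the recursion bottoms out in a lookup
      have hleft : pvGoA mods fuel
          (PySem.Chars.upper (PySem.Chars.strip (ab.takeWhile (· ≠ '|'))))
          = pvLookA mods (PySem.Chars.strip (ab.takeWhile (· ≠ '|'))) := by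
        have hnp : '|' ∉ PySem.Chars.upper (PySem.Chars.strip (ab.takeWhile (· ≠ '|'))) := by
          intro hx
          exact hl_nop (pv_mem_strip _ _ ((pv_pipe_mem_upper _).mp hx))
        have hlen2 : (PySem.Chars.upper (PySem.Chars.strip (ab.takeWhile (· ≠ '|')))).length < fuel := by
          rw [pv_length_upper]
          have := pv_length_strip (ab.takeWhile (· ≠ '|'))
          omega
        rw [ih _ hlen2, if_neg hnp, pv_lookA_upper]
      -- the right piece: by induction it is the max over its stripped segments
      have hrlen : (PySem.Chars.upper (PySem.Chars.strip ((ab.dropWhile (· ≠ '|')).drop 1))).length < fuel := by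
        rw [pv_length_upper]
        have := pv_length_strip ((ab.dropWhile (· ≠ '|')).drop 1)
        omega
      have hright := ih _ hrlen
      -- assemble
      have hparts : pvVals mods ab =
          pvLookA mods (PySem.Chars.strip (ab.takeWhile (· ≠ '|')))
            :: pvVals mods ((ab.dropWhile (· ≠ '|')).drop 1) := by
        unfold pvVals pvParts
        conv_lhs => rw [hab]
        rw [pv_segs_append_pipe _ _ hl_nop]
        simp
      show max (pvGoA mods fuel (PySem.Chars.upper (PySem.Chars.strip (ab.takeWhile (· ≠ '|')))))
             (pvGoA mods fuel (PySem.Chars.upper (PySem.Chars.strip ((ab.dropWhile (· ≠ '|')).drop 1))))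
           = pvMax (pvVals mods ab)
      by_cases hr : '|' ∈ (ab.dropWhile (· ≠ '|')).drop 1
      · have hru : '|' ∈ PySem.Chars.upper (PySem.Chars.strip ((ab.dropWhile (· ≠ '|')).drop 1)) :=
          (pv_pipe_mem_upper _).mpr (pv_pipe_mem_strip _ hr)
        rw [hleft, hright, if_pos hru, pv_vals_upper_strip, hparts]
        -- max a (pvMax (v :: vs)) = pvMax (a :: v :: vs)
        have hcons : ∃ v vs, pvVals mods ((ab.dropWhile (· ≠ '|')).drop 1) = v :: vs := by
          unfold pvVals pvParts
          exact ⟨_, _, rfl⟩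
        rcases hcons with ⟨v, vs, hv⟩
        rw [hv]
        show max _ (pvMax (v :: vs)) = pvMax (_ :: v :: vs)
        unfold pvMax
        rw [pv_foldl_max_comm]
        rfl
      · have hru : '|' ∉ PySem.Chars.upper (PySem.Chars.strip ((ab.dropWhile (· ≠ '|')).drop 1)) := by
          intro hx
          exact hr (pv_mem_strip _ _ ((pv_pipe_mem_upper _).mp hx))
        rw [hleft, hright, if_neg hru, pv_lookA_upper, hparts]
        have hsegr := pv_segs_no_pipe _ hr
        unfold pvVals pvParts
        rw [hsegr]
        show max _ _ = pvMax [_, _]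
        unfold pvMax
        simp [max_def]
    · rw [if_neg hm]
      have hIn : PySem.Chars.isIn ['|'] ab = false := by
        rcases Bool.eq_false_or_eq_true (PySem.Chars.isIn ['|'] ab) with h0 | h1
        · exact absurd ((pv_isIn_pipe ab).mp h0) hm
        · exact h1
      simp only [pvGoA, hIn, Bool.false_eq_true, if_false]

-- ---- B's scan computes the same ----
theorem pv_acc_step (b : Option Int) (v : Int) (vs : List Int) :
    pvAcc b (v :: vs) = pvAcc (match b with
      | none => some v
      | some b => if b < v then some v else some b) vs := by
  cases b with
  | none => rfl
  | some b =>
    show List.foldl max b (v :: vs) = pvAcc (if b < v then some v else some b) vs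
    by_cases hb : b < v
    · rw [if_pos hb]
      show List.foldl max (max b v) vs = List.foldl max v vs
      rw [max_eq_right hb.le]
    · rw [if_neg hb]
      show List.foldl max (max b v) vs = List.foldl max b vs
      rw [max_eq_left (not_lt.mp hb)]

theorem pv_scanB_spec (mods : PySem.Dict String Int) : ∀ (ab : List Char) (best : Option Int) (cur : List Char),
    '|' ∉ cur →
    pvScanB mods (ab ++ ['|']) (best, cur) = some (pvAcc best (pvVals mods (cur ++ ab))) := by
  intro ab
  induction ab with
  | nil =>
    intro best cur hcur
    have hvals : pvVals mods (cur ++ []) = [pvLookA mods (PySem.Chars.strip cur)] := by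
      unfold pvVals pvParts
      rw [List.append_nil, pv_segs_no_pipe cur hcur]
      rfl
    rw [List.nil_append, hvals]
    rw [show pvScanB mods ['|'] (best, cur) =
        (match best with
          | none => some (pvLookB mods (PySem.Chars.strip cur))
          | some b => if b < pvLookB mods (PySem.Chars.strip cur)
              then some (pvLookB mods (PySem.Chars.strip cur)) else some b) from by
      cases best <;> simp [pvScanB]]
    rw [pv_look_eq, pv_acc_step]
    cases best with
    | none => rfl
    | some b =>
      show (if b < pvLookA mods (PySem.Chars.strip cur)
          then some (pvLookA mods (PySem.Chars.strip cur)) else some b) =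
        some (pvAcc (if b < pvLookA mods (PySem.Chars.strip cur)
          then some (pvLookA mods (PySem.Chars.strip cur)) else some b) [])
      by_cases hb : b < pvLookA mods (PySem.Chars.strip cur)
      · rw [if_pos hb]; rfl
      · rw [if_neg hb]; rfl
  | cons c rest ih =>
    intro best cur hcur
    by_cases hc : c = '|'
    · subst hc
      have hvals : pvVals mods (cur ++ '|' :: rest) =
          pvLookA mods (PySem.Chars.strip cur) :: pvVals mods rest := by
        unfold pvVals pvParts
        rw [pv_segs_append_pipe _ _ hcur]
        simp
      rw [List.cons_append, hvals]
      rw [show pvScanB mods ('|' :: (rest ++ ['|'])) (best, cur) =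
          pvScanB mods (rest ++ ['|'])
            ((match best with
              | none => some (pvLookB mods (PySem.Chars.strip cur))
              | some b => if b < pvLookB mods (PySem.Chars.strip cur)
                  then some (pvLookB mods (PySem.Chars.strip cur)) else some b), []) from by
        cases best <;> simp [pvScanB]]
      rw [ih _ [] (by simp), List.nil_append, pv_look_eq, pv_acc_step]
    · rw [List.cons_append]
      rw [show pvScanB mods (c :: (rest ++ ['|'])) (best, cur) =
          pvScanB mods (rest ++ ['|']) (best, cur ++ [c]) from by
        simp [pvScanB, hc]]
      rw [ih best (cur ++ [c]) (by
        intro hx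
        rcases List.mem_append.mp hx with h | h
        · exact hcur h
        · simp only [List.mem_singleton] at h; exact hc h.symm)]
      rw [List.append_assoc, List.singleton_append]

-- the two ports build the same mods association list
theorem pv_mods_eq (stats : Option (List (String × List (String × Int)))) :
    (if ((PySem.Dict.mk (match stats with
        | none => ([] : List (String × List (String × Int)))
        | some s => if s.isEmpty then [] else s)).getD "mods" []).isEmpty
      then []
      else (PySem.Dict.mk (match stats with
        | none => ([] : List (String × List (String × Int)))
        | some s => if s.isEmpty then [] else s)).getD "mods" []) =
    (match (PySem.Dict.mk (stats.getD [])).get? "mods" with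
      | none => ([] : List (String × Int))
      | some m => if m.isEmpty then [] else m) := by
  have hbase : (match stats with
      | none => ([] : List (String × List (String × Int)))
      | some s => if s.isEmpty then [] else s) = stats.getD [] := by
    cases stats with
    | none => rfl
    | some s =>
      cases s with
      | nil => rfl
      | cons a t => rfl
  rw [hbase]
  rw [PySem.Dict.getD_eq_get?_getD]
  cases hg : (PySem.Dict.mk (stats.getD [])).get? "mods" with
  | none => rfl
  | some m => simp only [Option.getD_some]

-- ===== VERDICT (by name: the statement is the Claim_ definition above) =====
theorem ability_mod_py_spec : Claim_equal_ability_mod_py := by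
  intro stats ability _
  simp only [Spec_ability_mod_py, ability_mod_py, ability_mod_py_alt]
  rw [pv_mods_eq stats]
  set mods : PySem.Dict String Int := PySem.Dict.mk
    (match (PySem.Dict.mk (stats.getD [])).get? "mods" with
      | none => []
      | some m => if m.isEmpty then [] else m) with hmods
  rw [pv_goA_spec mods (ability.toList.length + 1) ability.toList (Nat.lt_succ_self _)]
  by_cases hm : '|' ∈ ability.toList
  · rw [if_pos hm, if_pos ((pv_isIn_pipe _).mpr hm)]
    rw [pv_scanB_spec mods ability.toList none [] (by simp)]
    rfl
  · rw [if_neg hm]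
    have hIn : PySem.Chars.isIn ['|'] ability.toList = false := by
      rcases Bool.eq_false_or_eq_true (PySem.Chars.isIn ['|'] ability.toList) with h0 | h1
      · exact absurd ((pv_isIn_pipe _).mp h0) hm
      · exact h1
    rw [hIn]
    simp only [Bool.false_eq_true, if_false]
    rw [pv_look_eq]
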